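-- pv_equiv track=rewrite | github.com/v-Chriz-v/Teor-a-de-la-Info | Esquema de comunicacion/ShannonFano.py | descomprimir_shannon_fano
-- ===== SOURCE A (Python) =====
-- def descomprimir_shannon_fano(datos, arbol):
--
--     diccionario_simbolo = {codigo: simbolo for simbolo, codigo in arbol}
--
--     datos_binarios = ''.join(format(byte, '08b') for byte in datos)
--     datos_desencriptados = []
--
--     codigo_actual = ''
--
--     for bit in datos_binarios:
--         codigo_actual += bit
--
--         if codigo_actual in diccionario_simbolo:
--
--             simbolo = diccionario_simbolo[codigo_actual]
--             datos_desencriptados.append(simbolo)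
--             codigo_actual = ''
--
--     return datos_desencriptados
-- ===== SOURCE B (Python) =====
-- def descomprimir_shannon_fano(datos, arbol):
--     # Build a prefix trie of the codes (last write wins, like dict overwrite),
--     # then decode by walking the trie one bit at a time instead of growing a
--     # string and hashing it on every bit.
--     root = [None, {}]  # [symbol, children]
--     for simbolo, codigo in arbol:
--         node = root
--         for ch in codigo:
--             node = node[1].setdefault(ch, [None, {}])
--         node[0] = simbolo
--
--     salida = []
--     node = root
--     for byte in datos:
--         for bit in format(byte, '08b'):
--             if node is not None:
--                 node = node[1].get(bit)
--             if node is not None and node[0] is not None: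
--                 salida.append(node[0])
--                 node = root
--     return salida
-- ===== Notes on version B (the rewrite author's own statement) =====
-- stated objective: faster
-- what changed: Replaces the grow-a-string-and-hash-it-per-bit decoder with a prefix trie built once from the codes; decoding advances a single node pointer per bit and resets to the root on each emitted symbol.
import Mathlib
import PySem

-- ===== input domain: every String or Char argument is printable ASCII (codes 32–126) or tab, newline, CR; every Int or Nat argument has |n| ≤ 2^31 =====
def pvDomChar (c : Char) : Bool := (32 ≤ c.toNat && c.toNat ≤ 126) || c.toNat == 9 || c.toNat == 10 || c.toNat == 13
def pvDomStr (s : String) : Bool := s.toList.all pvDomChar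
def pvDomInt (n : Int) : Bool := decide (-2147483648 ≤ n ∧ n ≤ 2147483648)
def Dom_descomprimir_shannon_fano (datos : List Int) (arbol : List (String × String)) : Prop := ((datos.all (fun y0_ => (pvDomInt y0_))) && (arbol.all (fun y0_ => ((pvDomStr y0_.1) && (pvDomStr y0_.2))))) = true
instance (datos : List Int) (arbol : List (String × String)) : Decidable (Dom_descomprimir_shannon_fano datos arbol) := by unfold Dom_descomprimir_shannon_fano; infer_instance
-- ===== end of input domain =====

-- B replaces A's grow-a-string-and-hash-it-per-bit decoding with a prefix trie of the
-- codes walked one node per bit (objective: faster; same return value, proved below).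


-- ===== PORT A =====
-- 'if codigo_actual in dicc: simbolo = dicc[codigo_actual]' is ported as a match on
-- Dict.get? (membership followed by indexing = get? returning some).
def descomprimir_shannon_fano (datos : List Int) (arbol : List (String × String)) : List String :=
  let diccionario_simbolo : PySem.Dict String String :=
    arbol.foldl (fun d p => d.insert p.2 p.1) PySem.Dict.empty
  let datos_binarios : List Char :=
    datos.flatMap (fun byte => (PySem.Str.zfill (PySem.Int.toBin byte) 8).toList)
  let r := datos_binarios.foldl
    (fun (st : List Char × List String) bit =>
      let codigo_actual := st.1 ++ [bit]
      match diccionario_simbolo.get? (String.ofList codigo_actual) with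
      | some simbolo => ([], st.2 ++ [simbolo])
      | none => (codigo_actual, st.2))
    ([], [])
  r.2

-- ===== PORT B =====
-- Source B's trie node [symbol, {char: child}]: mutual pair (no nested inductive).
mutual
inductive PTrie where
  | node : Option String → PKids → PTrie
deriving DecidableEq, Repr
inductive PKids where
  | nil : PKids
  | cons : Char → PTrie → PKids → PKids
deriving DecidableEq, Repr
end

-- children dict .get(ch)
def kidsGet : PKids → Char → Option PTrie
  | .nil, _ => none
  | .cons c t rest, ch => if c = ch then some t else kidsGet rest ch

-- functional write-back of a (possibly new) child, keeping dict insertion order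
def kidsSet : PKids → Char → PTrie → PKids
  | .nil, ch, t' => .cons ch t' .nil
  | .cons c t rest, ch, t' => if c = ch then .cons c t' rest else .cons c t (kidsSet rest ch t')

-- the inner 'for ch in codigo: node = node[1].setdefault(ch, …)' + 'node[0] = simbolo'
def trieInsert : PTrie → List Char → String → PTrie
  | .node _ k, [], sym => .node (some sym) k
  | .node s k, c :: cs, sym =>
      let child := (kidsGet k c).getD (.node none .nil)
      .node s (kidsSet k c (trieInsert child cs sym))

def trieSym : PTrie → Option String
  | .node s _ => s

def trieStep (t : PTrie) (c : Char) : Option PTrie :=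
  match t with
  | .node _ k => kidsGet k c

def descomprimir_shannon_fano_alt (datos : List Int) (arbol : List (String × String)) : List String :=
  let root : PTrie := arbol.foldl (fun r p => trieInsert r p.2.toList p.1) (.node none .nil)
  let r := datos.foldl
    (fun (st : Option PTrie × List String) byte =>
      (PySem.Str.zfill (PySem.Int.toBin byte) 8).toList.foldl
        (fun (st : Option PTrie × List String) bit =>
          let ptr := st.1.bind (fun t => trieStep t bit)
          match ptr with
          | some t =>
            match trieSym t with
            | some s => (some root, st.2 ++ [s])
            | none => (ptr, st.2)
          | none => (ptr, st.2))
        st)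
    (some root, [])
  r.2

-- ===== PRECONDITION & SPEC =====
def Spec_descomprimir_shannon_fano (datos : List Int) (arbol : List (String × String)) (out : List String) : Prop := out = descomprimir_shannon_fano_alt datos arbol
instance (datos : List Int) (arbol : List (String × String)) (out : List String) : Decidable (Spec_descomprimir_shannon_fano datos arbol out) := by unfold Spec_descomprimir_shannon_fano; infer_instance

-- ===== CLAIM (what is proved, stated in full; the proofs are below) =====
def Claim_equal_descomprimir_shannon_fano : Prop := ∀ (datos : List Int) (arbol : List (String × String)), Dom_descomprimir_shannon_fano datos arbol → Spec_descomprimir_shannon_fano datos arbol (descomprimir_shannon_fano datos arbol)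

-- ===== LEMMAS AND PROOFS =====

-- walk the trie along cs
def descend : PTrie → List Char → Option PTrie
  | t, [] => some t
  | t, c :: cs =>
    match trieStep t c with
    | some t' => descend t' cs
    | none => none

def lookupT (t : PTrie) (cs : List Char) : Option String := (descend t cs).bind trieSym

theorem lookupT_empty (cs : List Char) : lookupT (.node none .nil) cs = none := by
  cases cs <;> simp [lookupT, descend, trieStep, trieSym, kidsGet]

theorem lookupT_cons (s : Option String) (k : PKids) (c : Char) (cs : List Char) :
    lookupT (.node s k) (c :: cs) =
      (match kidsGet k c with
       | some t => lookupT t cs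
       | none => none) := by
  cases h : kidsGet k c <;> simp [lookupT, descend, trieStep, h]

theorem kidsGet_kidsSet (k : PKids) (ch c : Char) (t' : PTrie) :
    kidsGet (kidsSet k ch t') c = if c = ch then some t' else kidsGet k c := by
  match k with
  | .nil =>
    by_cases h : c = ch
    · subst h; simp [kidsSet, kidsGet]
    · simp [kidsSet, kidsGet, h, Ne.symm h]
  | .cons c0 t0 rest =>
    have ih := kidsGet_kidsSet rest ch c t'
    by_cases h : c0 = ch
    · subst h
      by_cases h2 : c = c0
      · subst h2; simp [kidsSet, kidsGet]
      · simp [kidsSet, kidsGet, h2, Ne.symm h2]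
    · by_cases h2 : c = c0
      · subst h2; simp [kidsSet, kidsGet, h]
      · simp [kidsSet, kidsGet, h, Ne.symm h2, ih]

theorem lookupT_insert (code : List Char) (t : PTrie) (sym : String) (cs : List Char) :
    lookupT (trieInsert t code sym) cs = if cs = code then some sym else lookupT t cs := by
  induction code generalizing t cs with
  | nil =>
    obtain ⟨s, k⟩ := t
    cases cs with
    | nil => simp [trieInsert, lookupT, descend, trieSym]
    | cons c cs' => simp [trieInsert, lookupT, descend, trieStep]
  | cons c code' ih =>
    obtain ⟨s, k⟩ := t
    cases cs with
    | nil => simp [trieInsert, lookupT, descend, trieSym]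
    | cons c' cs' =>
      have hstep : trieInsert (.node s k) (c :: code') sym
          = .node s (kidsSet k c (trieInsert ((kidsGet k c).getD (.node none .nil)) code' sym)) := rfl
      rw [hstep, lookupT_cons, lookupT_cons, kidsGet_kidsSet]
      by_cases hc : c' = c
      · subst hc
        cases hk : kidsGet k c' with
        | some ch0 => simp [ih]
        | none => simp [ih, lookupT_empty]
      · simp [hc]

theorem build_sync (l : List (String × String)) (d : PySem.Dict String String) (t : PTrie)
    (H : ∀ cs, d.get? (String.ofList cs) = lookupT t cs) (cs : List Char) :
    (l.foldl (fun d p => d.insert p.2 p.1) d).get? (String.ofList cs)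
      = lookupT (l.foldl (fun r p => trieInsert r p.2.toList p.1) t) cs := by
  induction l generalizing d t with
  | nil => exact H cs
  | cons p l' ih =>
    simp only [List.foldl_cons]
    refine ih _ _ (fun cs => ?_)
    rw [PySem.Dict.get?_insert, lookupT_insert]
    have hiff : String.ofList cs = p.2 ↔ cs = p.2.toList := by
      constructor
      · intro h; simpa using congrArg String.toList h
      · intro h; subst h; simp
    by_cases h : cs = p.2.toList
    · simp [h]
    · have h2 : ¬ String.ofList cs = p.2 := fun hh => h (hiff.mp hh)
      simp [h, h2, H]

theorem descend_append (t : PTrie) (cs : List Char) (c : Char) :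
    descend t (cs ++ [c]) = (descend t cs).bind (fun n => trieStep n c) := by
  induction cs generalizing t with
  | nil => cases h : trieStep t c <;> simp [descend, h]
  | cons c0 cs' ih =>
    simp only [List.cons_append, descend]
    cases h : trieStep t c0 <;> simp [ih]

theorem loop_sync (d : PySem.Dict String String) (root : PTrie)
    (H : ∀ cs, d.get? (String.ofList cs) = lookupT root cs) :
    ∀ (bits : List Char) (acc : List Char) (out : List String),
      (bits.foldl
        (fun (st : List Char × List String) bit =>
          let codigo_actual := st.1 ++ [bit]
          match d.get? (String.ofList codigo_actual) with
          | some simbolo => ([], st.2 ++ [simbolo])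
          | none => (codigo_actual, st.2))
        (acc, out)).2
      = (bits.foldl
          (fun (st : Option PTrie × List String) bit =>
            let ptr := st.1.bind (fun t => trieStep t bit)
            match ptr with
            | some t =>
              match trieSym t with
              | some s => (some root, st.2 ++ [s])
              | none => (ptr, st.2)
            | none => (ptr, st.2))
          (descend root acc, out)).2 := by
  intro bits
  induction bits with
  | nil => intro acc out; rfl
  | cons bit bits' ih =>
    intro acc out
    have hstep : (descend root acc).bind (fun t => trieStep t bit) = descend root (acc ++ [bit]) :=
      (descend_append root acc bit).symm
    have hd : d.get? (String.ofList (acc ++ [bit])) = (descend root (acc ++ [bit])).bind trieSym :=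
      H (acc ++ [bit])
    cases hp : descend root (acc ++ [bit]) with
    | none =>
      have hn : d.get? (String.ofList (acc ++ [bit])) = none := by rw [hd, hp]; rfl
      simp only [List.foldl_cons, hstep, hp, hn]
      have ih2 := ih (acc ++ [bit]) out
      rw [hp] at ih2
      exact ih2
    | some t =>
      cases hs : trieSym t with
      | none =>
        have hn : d.get? (String.ofList (acc ++ [bit])) = none := by rw [hd, hp]; simpa using hs
        simp only [List.foldl_cons, hstep, hp, hs, hn]
        have ih2 := ih (acc ++ [bit]) out
        rw [hp] at ih2
        exact ih2
      | some s =>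
        have hv : d.get? (String.ofList (acc ++ [bit])) = some s := by rw [hd, hp]; simpa using hs
        simp only [List.foldl_cons, hstep, hp, hs, hv]
        exact ih [] (out ++ [s])

theorem foldl_flatMap_eq {α β σ : Type} (xs : List α) (f : α → List β) (g : σ → β → σ) (init : σ) :
    (xs.flatMap f).foldl g init = xs.foldl (fun s x => (f x).foldl g s) init := by
  induction xs generalizing init with
  | nil => rfl
  | cons x xs' ih => simp [List.flatMap_cons, List.foldl_append, ih]

-- ===== VERDICT (by name: the statement is the Claim_ definition above) =====
theorem descomprimir_shannon_fano_spec : Claim_equal_descomprimir_shannon_fano := by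
  intro datos arbol _
  unfold Spec_descomprimir_shannon_fano descomprimir_shannon_fano descomprimir_shannon_fano_alt
  refine
    ((loop_sync
      (arbol.foldl (fun d p => d.insert p.2 p.1) PySem.Dict.empty)
      (arbol.foldl (fun r p => trieInsert r p.2.toList p.1) (.node none .nil))
      (build_sync arbol PySem.Dict.empty (.node none .nil)
        (fun cs => by simp [PySem.Dict.get?_empty, lookupT_empty]))
      (datos.flatMap (fun byte => (PySem.Str.zfill (PySem.Int.toBin byte) 8).toList)) [] []).trans ?_)
  exact congrArg Prod.snd (foldl_flatMap_eq datos _ _ _)
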